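-- pv_equiv track=rewrite | github.com/ridiaz2/iic2233-2018-2 | Tareas/T01/functions - copia.py | es_lista_de_numeros
-- ===== SOURCE A (Python) =====
-- def es_lista_de_numeros(texto, rango):
--     if texto.isnumeric():
--         if 0 <= int(texto) < rango:
--             return True
--         return False
--     elif "," not in texto:
--         return False
--     lista = map(lambda i: i.strip(), texto.split(","))
--     for i in lista:
--         if not es_lista_de_numeros(i, rango):
--             return False
--     return True
-- ===== SOURCE B (Python) =====
-- def es_lista_de_numeros(texto, rango):
--     if texto.isnumeric():
--         return 0 <= int(texto) < rango
--     if "," not in texto: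
--         return False
--     return all(t.strip().isnumeric() and 0 <= int(t.strip()) < rango
--                for t in texto.split(","))
-- ===== Notes on version B (the rewrite author's own statement) =====
-- stated objective: simpler
-- what changed: A validates each comma-split token by calling itself recursively; B keeps the two top-level guards but replaces the recursion with one flat non-recursive all() pass that inlines the numeric base case (strip, isnumeric, range check) over the split tokens.
import Mathlib
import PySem

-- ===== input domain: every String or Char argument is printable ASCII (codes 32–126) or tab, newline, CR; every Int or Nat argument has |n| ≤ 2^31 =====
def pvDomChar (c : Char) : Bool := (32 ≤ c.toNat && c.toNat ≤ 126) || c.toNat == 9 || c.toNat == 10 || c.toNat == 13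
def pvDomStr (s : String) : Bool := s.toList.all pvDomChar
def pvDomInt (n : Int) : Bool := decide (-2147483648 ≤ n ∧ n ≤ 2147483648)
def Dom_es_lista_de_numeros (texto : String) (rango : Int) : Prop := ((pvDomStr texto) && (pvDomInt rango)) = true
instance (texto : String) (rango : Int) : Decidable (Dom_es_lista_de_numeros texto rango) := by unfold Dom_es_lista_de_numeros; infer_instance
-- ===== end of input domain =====

-- B replaces A's self-recursion over the comma-split tokens by one flat non-recursive pass
-- that inlines the numeric base case over each stripped token (objective: simpler).

-- ===== PORT A =====
-- Termination facts for A's recursion (A recurses on comma-free tokens of the split,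
-- so the number of commas strictly decreases). Cited by name in `decreasing_by`.
theorem pv_go_no_comma (fuel : Nat) : ∀ (l cur : List Char) (acc : List (List Char)),
    l.length < fuel → (',' ∉ cur) → (∀ a ∈ acc, ',' ∉ a) →
    ∀ t ∈ PySem.Chars.splitOn.go [','] fuel l cur acc, ',' ∉ t := by
  induction fuel with
  | zero => intro l cur acc h; omega
  | succ n ih =>
    intro l cur acc hlen hcur hacc t ht
    cases l with
    | nil =>
      have he : PySem.Chars.splitOn.go [','] (n+1) [] cur acc = (cur.reverse :: acc).reverse := by
        simp [PySem.Chars.splitOn.go]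
      rw [he] at ht
      simp only [List.mem_reverse, List.mem_cons] at ht
      rcases ht with h | h
      · subst h; simpa using hcur
      · exact hacc _ h
    | cons c rest =>
      rw [PySem.Chars.splitOn.go] at ht
      by_cases hp : [','].isPrefixOf (c :: rest) = true
      · have hc : ',' = c := by simpa [List.isPrefixOf] using hp
        subst hc
        simp only [hp, if_pos, ] at ht
        refine ih rest [] (cur.reverse :: acc) (Nat.lt_of_succ_lt_succ hlen) (by simp) ?_ t ht
        intro a ha
        rcases List.mem_cons.mp ha with h | h
        · subst h; simpa using hcur
        · exact hacc _ h
      · have hc : c ≠ ',' := by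
          intro h; exact hp (by simp [h, List.isPrefixOf])
        simp only [hp, Bool.false_eq_true, if_neg, not_false_iff] at ht
        refine ih rest (c :: cur) acc (Nat.lt_of_succ_lt_succ hlen) ?_ hacc t ht
        intro h
        rcases List.mem_cons.mp h with h | h
        · exact hc h.symm
        · exact hcur h

theorem pv_splitOn_comma_no_comma (cs : List Char) :
    ∀ t ∈ PySem.Chars.splitOn cs [','], ',' ∉ t := by
  intro t ht
  exact pv_go_no_comma (cs.length + 1) cs [] [] (Nat.lt_succ_self _) (by simp) (by simp) t ht

theorem pv_strip_subset (t : List Char) : PySem.Chars.strip t ⊆ t := by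
  unfold PySem.Chars.strip PySem.Chars.rstrip PySem.Chars.lstrip
  intro x hx
  simp only [List.mem_reverse] at hx
  have h1 := (List.dropWhile_sublist (l := (List.dropWhile PySem.Chars.isspace t).reverse)
    (p := PySem.Chars.isspace)).subset hx
  simp only [List.mem_reverse] at h1
  exact (List.dropWhile_sublist (l := t) (p := PySem.Chars.isspace)).subset h1

-- Literal port of A on List Char.  `str.isnumeric` is PySem.Chars.strIsdigit (exact on the
-- printable-ASCII domain Dom); `int(texto)` is PySem.Int.ofChars? whose `.getD 0` default is
-- only evaluated under the strIsdigit guard, where Python's int() cannot raise.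
def pvEsA (cs : List Char) (rango : Int) : Bool :=
  if PySem.Chars.strIsdigit cs then
    decide (0 ≤ (PySem.Int.ofChars? cs).getD 0 ∧ (PySem.Int.ofChars? cs).getD 0 < rango)
  else if PySem.Chars.isIn [','] cs = false then
    false
  else
    let lista := (PySem.Chars.splitOn cs [',']).map PySem.Chars.strip
    lista.attach.all (fun i => pvEsA i.1 rango)
termination_by cs.count ','
decreasing_by
  rcases List.mem_map.mp i.2 with ⟨t, htmem, hteq⟩
  have hnc : ',' ∉ (i : List Char) := by
    rw [← hteq]
    intro h
    exact pv_splitOn_comma_no_comma cs t htmem (pv_strip_subset t h)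
  have h0 : (i : List Char).count ',' = 0 := List.count_eq_zero.mpr hnc
  rename_i hni
  have hin : PySem.Chars.isIn [','] cs = true := eq_true_of_ne_false hni
  have hmem : ',' ∈ cs :=
    ((PySem.Chars.isIn_iff_infix _ _).mp hin).sublist.subset (List.mem_singleton_self ',')
  have hpos : 0 < cs.count ',' := List.count_pos_iff.mpr hmem
  omega

def es_lista_de_numeros (texto : String) (rango : Int) : Bool :=
  pvEsA texto.toList rango

-- ===== PORT B =====
-- one token of B's flat pass: t.strip().isnumeric() and 0 <= int(t.strip()) < rango
def pvTokOk (t : List Char) (rango : Int) : Bool :=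
  PySem.Chars.strIsdigit (PySem.Chars.strip t) &&
  decide (0 ≤ (PySem.Int.ofChars? (PySem.Chars.strip t)).getD 0 ∧
          (PySem.Int.ofChars? (PySem.Chars.strip t)).getD 0 < rango)

def es_lista_de_numeros_alt (texto : String) (rango : Int) : Bool :=
  if PySem.Chars.strIsdigit texto.toList then
    decide (0 ≤ (PySem.Int.ofChars? texto.toList).getD 0 ∧
            (PySem.Int.ofChars? texto.toList).getD 0 < rango)
  else if PySem.Chars.isIn [','] texto.toList = false then
    false
  else
    (PySem.Chars.splitOn texto.toList [',']).all (fun t => pvTokOk t rango)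

-- ===== PRECONDITION & SPEC =====
def Spec_es_lista_de_numeros (texto : String) (rango : Int) (out : Bool) : Prop := out = es_lista_de_numeros_alt texto rango
instance (texto : String) (rango : Int) (out : Bool) : Decidable (Spec_es_lista_de_numeros texto rango out) := by unfold Spec_es_lista_de_numeros; infer_instance

-- ===== CLAIM (what is proved, stated in full; the proofs are below) =====
def Claim_equal_es_lista_de_numeros : Prop := ∀ (texto : String) (rango : Int), Dom_es_lista_de_numeros texto rango → Spec_es_lista_de_numeros texto rango (es_lista_de_numeros texto rango)

-- ===== LEMMAS AND PROOFS =====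
-- A on a comma-free string is exactly B's inlined base case.
theorem pv_base (u : List Char) (r : Int) (hu : ',' ∉ u) :
    pvEsA u r = (PySem.Chars.strIsdigit u &&
      decide (0 ≤ (PySem.Int.ofChars? u).getD 0 ∧ (PySem.Int.ofChars? u).getD 0 < r)) := by
  rw [pvEsA]
  by_cases hd : PySem.Chars.strIsdigit u = true
  · simp [hd]
  · have hni : PySem.Chars.isIn [','] u = false := by
      rw [PySem.Chars.isIn_eq_false_iff]
      intro hinf
      exact hu (hinf.sublist.subset (List.mem_singleton_self ','))
    simp [hd, hni]

-- ===== VERDICT (by name: the statement is the Claim_ definition above) =====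
theorem es_lista_de_numeros_spec : Claim_equal_es_lista_de_numeros := by
  intro texto rango _
  unfold Spec_es_lista_de_numeros es_lista_de_numeros es_lista_de_numeros_alt
  rw [pvEsA]
  by_cases hd : PySem.Chars.strIsdigit texto.toList = true
  · simp [hd]
  · simp only [hd, Bool.false_eq_true, if_false]
    by_cases hni : PySem.Chars.isIn [','] texto.toList = false
    · simp [hni]
    · simp only [hni, if_neg, Bool.not_eq_false]
      rw [Bool.eq_iff_iff]
      simp only [List.all_eq_true, List.mem_attach, true_implies, Subtype.forall, List.mem_map]
      constructor
      · intro h t ht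
        have := h (PySem.Chars.strip t) ⟨t, ht, rfl⟩
        rw [pv_base _ _ (fun hc => pv_splitOn_comma_no_comma _ t ht (pv_strip_subset t hc))] at this
        exact this
      · intro h u hu
        rcases hu with ⟨t, ht, rfl⟩
        rw [pv_base _ _ (fun hc => pv_splitOn_comma_no_comma _ t ht (pv_strip_subset t hc))]
        exact h t ht
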